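-- pv_equiv track=rewrite | github.com/nichitosx/LABs | Lab5_5.py | transform_duplicates
-- ===== SOURCE A (Python) =====
-- def transform_duplicates(numbers):
--     result = set()
--     duplicates = {}
--
--     for num in numbers:
--         if num not in duplicates:
--             duplicates[num] = 1
--         else:
--             duplicates[num] += 1
--
--         for i in range(1, duplicates[num] + 1):
--             result.add(str(num) * i)
--
--     return result
-- ===== SOURCE B (Python) =====
-- def transform_duplicates(numbers):
--     # Same set as A, but without the inner range loop: each occurrence adds
--     # only its own power (all lower powers are already in the set).
--     result = set()
--     counts = {}
--     for num in numbers: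
--         c = counts.get(num, 0) + 1
--         counts[num] = c
--         result.add(str(num) * c)
--     return result
-- ===== Notes on version B (the rewrite author's own statement) =====
-- stated objective: faster
-- what changed: B drops A's inner range loop that re-adds every lower power on each occurrence: a running counter lets each occurrence add exactly one string (its own power), since all lower powers are already in the set.
import Mathlib
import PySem

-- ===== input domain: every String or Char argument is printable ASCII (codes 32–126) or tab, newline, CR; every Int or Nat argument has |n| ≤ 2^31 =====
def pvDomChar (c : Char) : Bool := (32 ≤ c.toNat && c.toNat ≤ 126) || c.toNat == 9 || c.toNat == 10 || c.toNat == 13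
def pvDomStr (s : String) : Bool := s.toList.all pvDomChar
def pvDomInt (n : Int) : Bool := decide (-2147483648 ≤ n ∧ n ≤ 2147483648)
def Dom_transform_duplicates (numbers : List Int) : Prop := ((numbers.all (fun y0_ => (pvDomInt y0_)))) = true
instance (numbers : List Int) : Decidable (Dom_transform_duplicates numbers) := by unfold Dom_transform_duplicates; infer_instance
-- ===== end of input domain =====

-- B removes A's inner range loop (re-adding all lower powers) by keeping a running
-- counter and adding only the current power per occurrence; same returned set.

-- str(num) * i  (Python string repetition; exact: char-list repetition)
def pvStrTimes (num : Int) (i : Int) : String :=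
  String.mk (PySem.List.pyRepeat (PySem.Int.toStr num).toList i)

-- ===== PORT A =====
def tdStepA (st : PySem.Set String × PySem.Dict Int Int) (num : Int) :
    PySem.Set String × PySem.Dict Int Int :=
  let d := if st.2.contains num = false then st.2.insert num 1
           else st.2.insert num (st.2.getD num 0 + 1)
  let r := (PySem.List.pyRange 1 (d.getD num 0 + 1) 1).foldl
             (fun r i => PySem.Set.add r (pvStrTimes num i)) st.1
  (r, d)

def transform_duplicates (numbers : List Int) : List String :=
  (numbers.foldl tdStepA (PySem.Set.empty, PySem.Dict.empty)).1

-- ===== PORT B =====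
def tdStepB (st : PySem.Set String × PySem.Dict Int Int) (num : Int) :
    PySem.Set String × PySem.Dict Int Int :=
  let c := st.2.getD num 0 + 1
  (PySem.Set.add st.1 (pvStrTimes num c), st.2.insert num c)

def transform_duplicates_alt (numbers : List Int) : List String :=
  (numbers.foldl tdStepB (PySem.Set.empty, PySem.Dict.empty)).1

-- ===== PRECONDITION & SPEC =====
def Spec_transform_duplicates (numbers : List Int) (out : List String) : Prop := out = transform_duplicates_alt numbers
instance (numbers : List Int) (out : List String) : Decidable (Spec_transform_duplicates numbers out) := by unfold Spec_transform_duplicates; infer_instance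

-- ===== CLAIM (what is proved, stated in full; the proofs are below) =====
def Claim_equal_transform_duplicates : Prop := ∀ (numbers : List Int), Dom_transform_duplicates numbers → Spec_transform_duplicates numbers (transform_duplicates numbers)

-- ===== LEMMAS AND PROOFS =====

-- Invariant: counts are nonnegative, and for every n all powers 1..count(n) are in the set.
def tdInv (st : PySem.Set String × PySem.Dict Int Int) : Prop :=
  (∀ n : Int, 0 ≤ st.2.getD n 0) ∧
  (∀ n i : Int, 1 ≤ i → i ≤ st.2.getD n 0 → pvStrTimes n i ∈ st.1)

theorem foldl_add_of_mem {α : Type} [BEq α] [LawfulBEq α] (g : Int → α)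
    (l : List Int) (r : PySem.Set α) (h : ∀ x ∈ l, g x ∈ r) :
    l.foldl (fun r i => PySem.Set.add r (g i)) r = r := by
  induction l with
  | nil => rfl
  | cons a t ih =>
    simp only [List.foldl_cons]
    rw [PySem.Set.add_of_mem (h a (by simp))]
    exact ih fun x hx => h x (by simp [hx])

theorem tdStep_eq (st : PySem.Set String × PySem.Dict Int Int) (num : Int)
    (hinv : tdInv st) : tdStepA st num = tdStepB st num := by
  obtain ⟨hpos, hmem⟩ := hinv
  unfold tdStepA tdStepB
  have hc : 0 ≤ st.2.getD num 0 := hpos num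
  have hd : (if st.2.contains num = false then st.2.insert num 1
             else st.2.insert num (st.2.getD num 0 + 1))
            = st.2.insert num (st.2.getD num 0 + 1) := by
    by_cases h : st.2.contains num = false
    · rw [if_pos h, PySem.Dict.getD_of_not_contains (d := st.2) (k := num) (d0 := 0) h]; norm_num
    · rw [if_neg h]
  rw [hd]
  simp only [PySem.Dict.getD_insert_self]
  have hsplit : PySem.List.pyRange 1 (st.2.getD num 0 + 1 + 1) 1
      = PySem.List.pyRange 1 (st.2.getD num 0 + 1) 1 ++ [st.2.getD num 0 + 1] :=
    PySem.List.pyRange_one_succ_right (by omega)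
  rw [hsplit, List.foldl_append]
  rw [foldl_add_of_mem (pvStrTimes num) _ st.1 (by
    intro x hx
    rw [PySem.List.mem_pyRange_one] at hx
    exact hmem num x hx.1 (by omega))]
  simp

theorem tdInv_step (st : PySem.Set String × PySem.Dict Int Int) (num : Int)
    (hinv : tdInv st) : tdInv (tdStepB st num) := by
  obtain ⟨hpos, hmem⟩ := hinv
  unfold tdStepB
  constructor
  · intro n
    simp only [PySem.Dict.getD_insert]
    split_ifs with h
    · have := hpos num; omega
    · exact hpos n
  · intro n i h1 h2
    simp only [PySem.Dict.getD_insert] at h2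
    split_ifs at h2 with h
    · subst h
      rcases eq_or_lt_of_le h2 with heq | hlt
      · rw [heq]; simp [PySem.Set.mem_add]
      · exact (PySem.Set.mem_add _ _ _).mpr (Or.inl (hmem n i h1 (by omega)))
    · exact (PySem.Set.mem_add _ _ _).mpr (Or.inl (hmem n i h1 h2))

theorem tdFoldl_eq (l : List Int) (st : PySem.Set String × PySem.Dict Int Int)
    (hinv : tdInv st) : l.foldl tdStepA st = l.foldl tdStepB st := by
  induction l generalizing st with
  | nil => rfl
  | cons a t ih =>
    simp only [List.foldl_cons]
    rw [tdStep_eq st a hinv]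
    exact ih _ (tdInv_step st a hinv)

theorem tdInv_init : tdInv (PySem.Set.empty, PySem.Dict.empty) := by
  constructor
  · intro n; simp [PySem.Dict.getD_empty]
  · intro n i h1 h2
    simp [PySem.Dict.getD_empty] at h2
    omega

-- ===== VERDICT (by name: the statement is the Claim_ definition above) =====
theorem transform_duplicates_spec : Claim_equal_transform_duplicates := by
  intro numbers _
  unfold Spec_transform_duplicates transform_duplicates transform_duplicates_alt
  rw [tdFoldl_eq numbers _ tdInv_init]
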